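-- pv_equiv track=rewrite | github.com/jgregoriods/santiago-staff | processing.py | split_sequences
-- ===== SOURCE A (Python) =====
-- def split_sequences(lines):
--     sequences = []
--     for line in lines:
--         i = 0
--         j = 1
--         while j < len(line):
--             if line[j][-3:] == '.76':
--                 sequences.append(line[i:j])
--                 i = j
--             j += 1
--     for sequence in sequences:
--         sequence[0] = sequence[0][:-3]
--         sequence.insert(1, '<76>')
--     filtered_sequences = [seq for seq in sequences if seq[0] and len(seq) >= 4]
--     return sequences, filtered_sequences
-- ===== SOURCE B (Python) =====
-- def split_sequences(lines):
--     sequences = []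
--     for line in lines:
--         marks = [j for j in range(1, len(line)) if line[j][-3:] == '.76']
--         bounds = [0] + marks
--         for x, y in zip(bounds, bounds[1:]):
--             sequences.append([line[x][:-3], '<76>'] + line[x+1:y])
--     filtered_sequences = [seq for seq in sequences if seq[0] and len(seq) >= 4]
--     return sequences, filtered_sequences
-- ===== Notes on version B (the rewrite author's own statement) =====
-- stated objective: alternative
-- what changed: Replaces the stateful two-index while-scan plus a second in-place mutation pass with a marker-index table per line: boundaries [0]+marks are paired via zip(bounds, bounds[1:]) and each transformed sequence is built directly from its slice bounds in one step, with no mutation pass.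
import Mathlib
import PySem

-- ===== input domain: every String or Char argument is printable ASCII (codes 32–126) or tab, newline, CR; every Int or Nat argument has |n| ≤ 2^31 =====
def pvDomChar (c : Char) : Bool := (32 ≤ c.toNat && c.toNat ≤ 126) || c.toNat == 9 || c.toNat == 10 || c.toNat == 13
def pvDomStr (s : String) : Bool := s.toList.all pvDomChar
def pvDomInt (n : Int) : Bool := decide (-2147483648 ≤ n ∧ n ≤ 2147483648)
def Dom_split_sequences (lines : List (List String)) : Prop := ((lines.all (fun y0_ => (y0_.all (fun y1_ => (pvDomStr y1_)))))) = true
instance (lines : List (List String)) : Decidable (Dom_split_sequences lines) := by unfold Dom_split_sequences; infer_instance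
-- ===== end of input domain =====

-- B replaces A's stateful two-index while-scan and in-place mutation pass by a per-line
-- marker-index table whose consecutive boundary pairs directly yield each transformed sequence.

-- shared transliterations of subexpressions both Pythons contain verbatim:
-- tok[-3:] == '.76', tok[:-3], and the filter predicate 'seq[0] and len(seq) >= 4'
def pvMark (s : String) : Bool := PySem.Str.slice s (some (-3)) none == ".76"
def pvStrip (s : String) : String := PySem.Str.slice s none (some (-3))
def pvKeep (seq : List String) : Bool := (PySem.List.pyGetD seq 0 "" != "") && decide (4 ≤ seq.length)

-- ===== PORT A =====
-- the while loop: state (i, j, sequences)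
def aScan (line : List String) (i j : Nat) (acc : List (List String)) : List (List String) :=
  if j < line.length then
    if pvMark (PySem.List.pyGetD line (j : Int) "") then
      aScan line j (j + 1) (acc ++ [PySem.List.slice line (some (i : Int)) (some (j : Int))])
    else
      aScan line i (j + 1) acc
  else acc
termination_by line.length - j

-- the second pass: sequence[0] = sequence[0][:-3]; sequence.insert(1, '<76>')
def aTrans (seq : List String) : List String :=
  PySem.List.insert (seq.set 0 (pvStrip (PySem.List.pyGetD seq 0 ""))) 1 "<76>"

def split_sequences (lines : List (List String)) : List (List String) × List (List String) :=
  let raw := lines.foldl (fun acc line => aScan line 0 1 acc) []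
  let sequences := raw.map aTrans
  (sequences, sequences.filter pvKeep)

-- ===== PORT B =====
-- per line: marker table, boundaries, zip of consecutive boundary pairs
def bSegs (line : List String) : List (List String) :=
  let marks := (PySem.List.pyRange 1 (line.length : Int) 1).filter
      (fun j => pvMark (PySem.List.pyGetD line j ""))
  let bounds := (0 : Int) :: marks
  (bounds.zip bounds.tail).map (fun xy =>
    pvStrip (PySem.List.pyGetD line xy.1 "") :: "<76>" ::
      PySem.List.slice line (some (xy.1 + 1)) (some xy.2))

def split_sequences_alt (lines : List (List String)) : List (List String) × List (List String) :=
  let sequences := lines.foldl (fun acc line => acc ++ bSegs line) []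
  (sequences, sequences.filter pvKeep)

-- ===== PRECONDITION & SPEC =====
def Spec_split_sequences (lines : List (List String)) (out : List (List String) × List (List String)) : Prop := out = split_sequences_alt lines
instance (lines : List (List String)) (out : List (List String) × List (List String)) : Decidable (Spec_split_sequences lines out) := by unfold Spec_split_sequences; infer_instance

-- ===== CLAIM (what is proved, stated in full; the proofs are below) =====
def Claim_equal_split_sequences : Prop := ∀ (lines : List (List String)), Dom_split_sequences lines → Spec_split_sequences lines (split_sequences lines)

-- ===== LEMMAS AND PROOFS =====

-- marker indices of `line` from position j on
def marksFrom (line : List String) (j : Int) : List Int :=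
  (PySem.List.pyRange j (line.length : Int) 1).filter
    (fun m => pvMark (PySem.List.pyGetD line m ""))

def segOf (line : List String) (xy : Int × Int) : List String :=
  PySem.List.slice line (some xy.1) (some xy.2)

-- raw (untransformed) segments B's boundary table describes
def rawSegs (line : List String) : List (List String) :=
  (((0 : Int) :: marksFrom line 1).zip (marksFrom line 1)).map (segOf line)

theorem marksFrom_nil {line : List String} {j : Int} (h : (line.length : Int) ≤ j) :
    marksFrom line j = [] := by
  unfold marksFrom
  rw [PySem.List.pyRange_one_eq_nil h]
  rfl

theorem marksFrom_cons {line : List String} {j : Int} (h : j < (line.length : Int)) :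
    marksFrom line j =
      (if pvMark (PySem.List.pyGetD line j "") then [j] else []) ++ marksFrom line (j + 1) := by
  unfold marksFrom
  rw [PySem.List.pyRange_one_cons h, List.filter_cons]
  split_ifs <;> simp

theorem aScan_eq (line : List String) (i j : Nat) (acc : List (List String)) :
    aScan line i j acc =
      acc ++ (((i : Int) :: marksFrom line j).zip (marksFrom line j)).map (segOf line) := by
  induction i, j, acc using aScan.induct (line := line) with
  | case1 i j acc hj hm ih =>
    rw [aScan]
    simp only [hj, if_true, hm, if_true]
    rw [ih, marksFrom_cons (j := (j : Int)) (by exact_mod_cast hj)]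
    push_cast
    simp only [PySem.List.pyGetD_natCast, List.getD_eq_getElem?_getD] at hm
    simp [hm, segOf, List.append_assoc]
  | case2 i j acc hj hm ih =>
    rw [aScan]
    simp only [hj, if_true, hm, Bool.false_eq_true, if_false]
    rw [ih, marksFrom_cons (j := (j : Int)) (by exact_mod_cast hj)]
    push_cast
    simp only [PySem.List.pyGetD_natCast, List.getD_eq_getElem?_getD] at hm
    simp [hm]
  | case3 i j acc hj =>
    rw [aScan]
    simp only [hj, if_false]
    rw [marksFrom_nil (by exact_mod_cast Nat.le_of_not_lt hj)]
    simp

theorem zip_tail_lt {l : List Int} (h : l.Pairwise (· < ·)) :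
    ∀ p ∈ l.zip l.tail, p.1 < p.2 := by
  induction l with
  | nil => simp
  | cons x xs ih =>
    cases xs with
    | nil => simp
    | cons y ys =>
      intro p hp
      rcases List.mem_cons.mp hp with h1 | h2
      · subst h1; exact (List.pairwise_cons.mp h).1 y (by simp)
      · exact ih (List.pairwise_cons.mp h).2 p h2

theorem marksFrom_bounds {line : List String} {m : Int} (hm : m ∈ marksFrom line 1) :
    1 ≤ m ∧ m < (line.length : Int) := by
  unfold marksFrom at hm
  exact PySem.List.mem_pyRange_one.mp (List.mem_filter.mp hm).1

theorem marksFrom_pairwise (line : List String) :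
    (marksFrom line 1).Pairwise (· < ·) :=
  (PySem.List.pairwise_lt_pyRange_one 1 (line.length : Int) ).filter _

theorem pair_eq {line : List String} {a b : Int}
    (ha : 0 ≤ a) (hab : a < b) (hb : b < (line.length : Int)) :
    aTrans (segOf line (a, b)) =
      pvStrip (PySem.List.pyGetD line a "") :: "<76>" ::
        PySem.List.slice line (some (a + 1)) (some b) := by
  obtain ⟨a', rfl⟩ : ∃ n : ℕ, a = (n : Int) := ⟨a.toNat, (Int.toNat_of_nonneg ha).symm⟩
  obtain ⟨b', rfl⟩ : ∃ n : ℕ, b = (n : Int) :=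
    ⟨b.toNat, (Int.toNat_of_nonneg (le_of_lt (lt_of_le_of_lt ha hab))).symm⟩
  have hab' : a' < b' := by exact_mod_cast hab
  have hb' : b' < line.length := by exact_mod_cast hb
  have ha' : a' < line.length := lt_trans hab' hb'
  unfold segOf aTrans
  rw [PySem.List.slice_natCast, List.drop_eq_getElem_cons ha',
    show b' - a' = (b' - a' - 1) + 1 by omega, List.take_succ_cons,
    show ((a' : Int) + 1) = ((a' + 1 : ℕ) : Int) by push_cast; ring,
    PySem.List.slice_natCast,
    show (1 : Int) = ((1 : ℕ) : Int) by simp,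
    PySem.List.insert_natCast _ 1 _ (by simp)]
  simp [List.getElem?_eq_getElem ha', show b' - (a' + 1) = b' - a' - 1 by omega]

theorem bSegs_eq (line : List String) : bSegs line = (rawSegs line).map aTrans := by
  have hraw : (rawSegs line).map aTrans =
      (((0 : Int) :: marksFrom line 1).zip (marksFrom line 1)).map
        (fun xy => aTrans (segOf line xy)) := by
    unfold rawSegs; rw [List.map_map]; rfl
  have hb : bSegs line =
      (((0 : Int) :: marksFrom line 1).zip (marksFrom line 1)).map
        (fun xy => pvStrip (PySem.List.pyGetD line xy.1 "") :: "<76>" ::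
          PySem.List.slice line (some (xy.1 + 1)) (some xy.2)) := rfl
  rw [hraw, hb]
  have hpw : ((0 : Int) :: marksFrom line 1).Pairwise (· < ·) :=
    List.pairwise_cons.mpr
      ⟨fun m hm => lt_of_lt_of_le one_pos (marksFrom_bounds hm).1, marksFrom_pairwise line⟩
  refine (List.map_congr_left fun xy hxy => ?_).symm
  obtain ⟨h1, h2⟩ := List.of_mem_zip (by simpa using hxy)
  have hlt : xy.1 < xy.2 := zip_tail_lt hpw xy (by simpa using hxy)
  have ha : 0 ≤ xy.1 := by
    rcases List.mem_cons.mp h1 with h | h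
    · simp [h]
    · exact le_of_lt (lt_of_lt_of_le one_pos (marksFrom_bounds h).1)
  have := pair_eq ha hlt (marksFrom_bounds h2).2
  simpa using this

theorem foldlA_eq (lines : List (List String)) :
    ∀ acc, lines.foldl (fun acc line => aScan line 0 1 acc) acc
      = acc ++ lines.flatMap rawSegs := by
  induction lines with
  | nil => simp
  | cons l ls ih =>
    intro acc
    simp only [List.foldl_cons, List.flatMap_cons]
    rw [aScan_eq l 0 1 acc, ih]
    simp [rawSegs]

theorem foldlB_eq (lines : List (List String)) :
    ∀ acc, lines.foldl (fun acc line => acc ++ bSegs line) acc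
      = acc ++ lines.flatMap bSegs := by
  induction lines with
  | nil => simp
  | cons l ls ih =>
    intro acc
    simp only [List.foldl_cons, List.flatMap_cons]
    rw [ih]
    simp

-- ===== VERDICT (by name: the statement is the Claim_ definition above) =====
theorem split_sequences_spec : Claim_equal_split_sequences := by
  intro lines _
  unfold Spec_split_sequences split_sequences split_sequences_alt
  rw [foldlA_eq lines [], foldlB_eq lines []]
  simp only [List.nil_append, List.map_flatMap]
  have : ∀ l, (rawSegs l).map aTrans = bSegs l := fun l => (bSegs_eq l).symm
  simp only [this]
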